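-- pv_equiv track=rewrite | github.com/danielfinsper/EP-2-dsoft | funcoes.py | calcula_pontos_quadra
-- ===== SOURCE A (Python) =====
-- def calcula_pontos_quadra (lista):
--     contar1 = lista.count(1)
--     contar2 = lista.count(2)
--     contar3 = lista.count(3)
--     contar4 = lista.count(4)
--     contar5 = lista.count(5)
--     contar6 = lista.count(6)
--
--     contagens = [contar1, contar2, contar3, contar4, contar5, contar6]
--
--     contar_maior = 0
--     for i in contagens:
--         if i > contar_maior:
--             contar_maior=i
--
--     soma = 0
--
--     if contar_maior>3:
--         for i in lista:
--             soma = soma + i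
--         return soma
--     else:
--         return 0
-- ===== SOURCE B (Python) =====
-- def calcula_pontos_quadra(lista):
--     s = sorted(lista)
--     if any(x == y and 1 <= x <= 6 for x, y in zip(s, s[3:])):
--         return sum(lista)
--     return 0
-- ===== Notes on version B (the rewrite author's own statement) =====
-- stated objective: alternative
-- what changed: Sort-then-window-scan: sorts the list and looks for a value in 1..6 repeated at distance 3 in the sorted order (a run of four equal elements), instead of A's six list.count scans plus a running-max loop and a manual summing loop.
import Mathlib
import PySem

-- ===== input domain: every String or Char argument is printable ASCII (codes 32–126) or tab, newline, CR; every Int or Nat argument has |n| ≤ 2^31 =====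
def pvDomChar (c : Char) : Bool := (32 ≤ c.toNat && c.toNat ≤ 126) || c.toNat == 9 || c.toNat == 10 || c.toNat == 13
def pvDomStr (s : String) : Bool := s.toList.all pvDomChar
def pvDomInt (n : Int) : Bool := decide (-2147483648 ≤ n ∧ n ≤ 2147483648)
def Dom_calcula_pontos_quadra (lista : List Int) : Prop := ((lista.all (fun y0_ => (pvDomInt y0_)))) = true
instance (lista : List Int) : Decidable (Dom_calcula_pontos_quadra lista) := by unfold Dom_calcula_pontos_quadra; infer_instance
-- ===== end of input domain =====

-- B is a different algorithm: sort the list and scan for a value in 1..6 repeated at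
-- distance 3 in the sorted order (a run of four equals), instead of A's six count scans,
-- running-max loop and manual summing loop.


-- ===== PORT A =====
def calcula_pontos_quadra (lista : List Int) : Int :=
  let contar1 : Int := PySem.List.count lista 1
  let contar2 : Int := PySem.List.count lista 2
  let contar3 : Int := PySem.List.count lista 3
  let contar4 : Int := PySem.List.count lista 4
  let contar5 : Int := PySem.List.count lista 5
  let contar6 : Int := PySem.List.count lista 6
  let contagens : List Int := [contar1, contar2, contar3, contar4, contar5, contar6]
  let contar_maior : Int := contagens.foldl (fun m i => if i > m then i else m) 0
  let soma : Int := 0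
  if contar_maior > 3 then lista.foldl (fun s i => s + i) soma
  else 0

-- ===== PORT B =====
def calcula_pontos_quadra_alt (lista : List Int) : Int :=
  let s := PySem.List.sorted lista (fun x => x) false
  if (s.zip (PySem.List.slice s (some 3) none)).any
      (fun p => p.1 == p.2 && decide (1 ≤ p.1) && decide (p.1 ≤ 6)) then
    lista.sum
  else 0

-- ===== PRECONDITION & SPEC =====
def Spec_calcula_pontos_quadra (lista : List Int) (out : Int) : Prop := out = calcula_pontos_quadra_alt lista
instance (lista : List Int) (out : Int) : Decidable (Spec_calcula_pontos_quadra lista out) := by unfold Spec_calcula_pontos_quadra; infer_instance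

-- ===== CLAIM (what is proved, stated in full; the proofs are below) =====
def Claim_equal_calcula_pontos_quadra : Prop := ∀ (lista : List Int), Dom_calcula_pontos_quadra lista → Spec_calcula_pontos_quadra lista (calcula_pontos_quadra lista)

-- ===== LEMMAS AND PROOFS =====

-- In a sorted (Pairwise ≤) list, the occurrences of v form one contiguous run
-- preceded only by smaller elements.
lemma sorted_count_run (v : Int) (s : List Int) (hs : s.Pairwise (· ≤ ·)) :
    ∃ l1 l2, s = l1 ++ (List.replicate (s.count v) v ++ l2) ∧ ∀ x ∈ l1, x < v := by
  induction s with
  | nil => exact ⟨[], [], by simp, by simp⟩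
  | cons a t ih =>
    have hat : ∀ x ∈ t, a ≤ x := fun x hx => (List.pairwise_cons.mp hs).1 x hx
    obtain ⟨l1, l2, ht, hl1⟩ := ih (List.pairwise_cons.mp hs).2
    by_cases hav : a = v
    · subst hav
      have hl1nil : l1 = [] := by
        cases l1 with
        | nil => rfl
        | cons b l1' =>
          have hb : b ∈ t := by rw [ht]; simp
          have h1 := hl1 b (by simp)
          have h2 := hat b hb
          omega
      subst hl1nil
      refine ⟨[], l2, ?_, by simp⟩
      rw [List.count_cons_self, List.replicate_succ, List.nil_append, List.cons_append]
      exact congrArg (List.cons a) (by simpa using ht)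
    · by_cases hcv : t.count v = 0
      · have hc0 : (a :: t).count v = 0 := by
          simp [hcv, hav]
        refine ⟨[], a :: t, ?_, by simp⟩
        rw [hc0]; simp
      · have hvt : v ∈ t := by
          by_contra h
          exact hcv (List.count_eq_zero.mpr h)
        have hav' : a < v := lt_of_le_of_ne (hat v hvt) hav
        refine ⟨a :: l1, l2, ?_, ?_⟩
        · have : (a :: t).count v = t.count v := by
            simp [hav]
          rw [this, List.cons_append]
          exact congrArg (List.cons a) ht
        · intro x hx
          rcases List.mem_cons.mp hx with rfl | hx
          · exact hav'
          · exact hl1 x hx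

-- The window scan over the sorted list triggers exactly when some value in 1..6
-- occurs at least four times.
lemma zip_any_iff (lista : List Int) :
    ((PySem.List.sorted lista (fun x => x) false).zip
        ((PySem.List.sorted lista (fun x => x) false).drop 3)).any
      (fun p => p.1 == p.2 && decide (1 ≤ p.1) && decide (p.1 ≤ 6)) = true
      ↔ ∃ v : Int, 1 ≤ v ∧ v ≤ 6 ∧ 4 ≤ lista.count v := by
  set s := PySem.List.sorted lista (fun x => x) false with hsdef
  have hperm : s.Perm lista := PySem.List.sorted_perm lista (fun x => x) false
  have hcount : ∀ v : Int, s.count v = lista.count v := fun v => hperm.count_eq v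
  have hpw : s.Pairwise (· ≤ ·) := by
    simpa using PySem.List.sorted_pairwise lista (fun x => x)
  have hlen : (s.zip (s.drop 3)).length = s.length - 3 := by
    rw [List.length_zip, List.length_drop]; omega
  constructor
  · intro h
    obtain ⟨p, hp, hpred⟩ := List.any_eq_true.mp h
    obtain ⟨i, hi, hip⟩ := List.mem_iff_getElem.mp hp
    have hii : i < s.length := by omega
    have hi3 : 3 + i < s.length := by omega
    have hzi : p = (s[i], s[3 + i]) := by
      rw [← hip, List.getElem_zip, List.getElem_drop]
    rw [hzi] at hpred
    simp only [Bool.and_eq_true, beq_iff_eq, decide_eq_true_eq] at hpred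
    obtain ⟨⟨heq, h1⟩, h6⟩ := hpred
    refine ⟨s[i], h1, h6, ?_⟩
    rw [← hcount]
    have hmono : ∀ j (hj : j < s.length), i ≤ j → j ≤ 3 + i → s[j] = s[i] := by
      intro j hj hij hji
      rcases eq_or_lt_of_le hij with rfl | hlt
      · rfl
      · have hle1 : s[i] ≤ s[j] := List.pairwise_iff_getElem.mp hpw i j hii hj hlt
        have hle2 : s[j] ≤ s[3 + i] := by
          rcases eq_or_lt_of_le hji with rfl | hlt2
          · exact le_refl _
          · exact List.pairwise_iff_getElem.mp hpw j (3 + i) hj hi3 hlt2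
        omega
    have h4 : (s.drop i).take 4 = [s[i], s[i], s[i], s[i]] := by
      apply List.ext_getElem
      · simp; omega
      · intro j hj1 hj2
        have hjlen : j < 4 := by simpa using hj2
        rw [List.getElem_take, List.getElem_drop]
        rw [hmono (i + j) (by omega) (by omega) (by omega)]
        interval_cases j <;> rfl
    have hsub : ((s.drop i).take 4).Sublist s :=
      (List.take_sublist _ _).trans (List.drop_sublist _ _)
    have hle := List.Sublist.count_le (s[i]'hii) hsub
    rw [h4] at hle
    simpa using hle
  · rintro ⟨v, h1, h6, hc⟩
    have hc' : 4 ≤ s.count v := by rw [hcount]; exact hc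
    obtain ⟨l1, l2, hdec, -⟩ := sorted_count_run v s hpw
    generalize hn : s.count v = n at hdec hc'
    have hslen : s.length = l1.length + n + l2.length := by
      conv_lhs => rw [hdec]
      simp [Nat.add_assoc]
    have hzlen : l1.length < (s.zip (s.drop 3)).length := by omega
    have hii : l1.length < s.length := by omega
    have hi3 : 3 + l1.length < s.length := by omega
    have hdrop : s.drop l1.length = List.replicate n v ++ l2 := by
      rw [hdec, List.drop_left]
    have key : ∀ (j : Nat) (hj : j < 4), s[l1.length + j]'(by omega) = v := by
      intro j hj
      have h2 : j < (s.drop l1.length).length := by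
        rw [List.length_drop]; omega
      rw [show s[l1.length + j]'(by omega) = (s.drop l1.length)[j]'h2 from
        (List.getElem_drop).symm]
      rw [List.getElem_of_eq hdrop h2, List.getElem_append_left (by simp; omega)]
      simp
    have hg0 : s[l1.length]'hii = v := by simpa using key 0 (by omega)
    have hg3 : s[3 + l1.length]'hi3 = v := by
      simpa [Nat.add_comm] using key 3 (by omega)
    apply List.any_eq_true.mpr
    refine ⟨(v, v), ?_, by simp [h1, h6]⟩
    have hz : (s.zip (s.drop 3))[l1.length]'hzlen = (v, v) := by
      rw [List.getElem_zip, List.getElem_drop, hg0, hg3]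
    rw [← hz]
    exact List.getElem_mem hzlen
-- A's running max over the six counts exceeds 3 iff one of the counts does.
lemma runmax_gt3 (a b c d e f : Int) (ha : 0 ≤ a) (hb : 0 ≤ b) (hc : 0 ≤ c)
    (hd : 0 ≤ d) (he : 0 ≤ e) (hf : 0 ≤ f) :
    (([a, b, c, d, e, f] : List Int).foldl (fun m i => if i > m then i else m) 0 > 3)
      ↔ (a > 3 ∨ b > 3 ∨ c > 3 ∨ d > 3 ∨ e > 3 ∨ f > 3) := by
  simp only [List.foldl]
  split_ifs <;> omega

-- ===== VERDICT (by name: the statement is the Claim_ definition above) =====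
theorem calcula_pontos_quadra_spec : Claim_equal_calcula_pontos_quadra := by
  intro lista _
  show calcula_pontos_quadra lista = calcula_pontos_quadra_alt lista
  simp only [calcula_pontos_quadra, calcula_pontos_quadra_alt]
  rw [PySem.List.slice_from _ (by norm_num)]
  rw [show ((3 : Int).toNat) = 3 from rfl]
  simp only [PySem.List.count_eq]
  rw [PySem.List.foldl_add (g := fun x => x)]
  simp only [zero_add, List.map_id']
  have hmax := runmax_gt3 ((lista.count 1 : Int)) ((lista.count 2 : Int))
    ((lista.count 3 : Int)) ((lista.count 4 : Int)) ((lista.count 5 : Int))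
    ((lista.count 6 : Int)) (by positivity) (by positivity) (by positivity)
    (by positivity) (by positivity) (by positivity)
  have hiff :
      (([((lista.count 1 : Nat) : Int), (lista.count 2 : Nat), (lista.count 3 : Nat),
          (lista.count 4 : Nat), (lista.count 5 : Nat), (lista.count 6 : Nat)] : List Int).foldl
        (fun m i => if i > m then i else m) 0 > 3)
        ↔ ((PySem.List.sorted lista (fun x => x) false).zip
            ((PySem.List.sorted lista (fun x => x) false).drop 3)).any
          (fun p => p.1 == p.2 && decide (1 ≤ p.1) && decide (p.1 ≤ 6)) = true := by
    rw [hmax, zip_any_iff]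
    constructor
    · rintro (h | h | h | h | h | h)
      · exact ⟨1, by norm_num, by norm_num, by omega⟩
      · exact ⟨2, by norm_num, by norm_num, by omega⟩
      · exact ⟨3, by norm_num, by norm_num, by omega⟩
      · exact ⟨4, by norm_num, by norm_num, by omega⟩
      · exact ⟨5, by norm_num, by norm_num, by omega⟩
      · exact ⟨6, by norm_num, by norm_num, by omega⟩
    · rintro ⟨v, h1, h6, hc⟩
      interval_cases v
      · left; omega
      · right; left; omega
      · right; right; left; omega
      · right; right; right; left; omega
      · right; right; right; right; left; omega
      · right; right; right; right; right; omega
  split_ifs with hA hB hB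
  · rfl
  · exact absurd (hiff.mp hA) hB
  · exact absurd (hiff.mpr hB) hA
  · rfl
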